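-- pv_equiv track=rewrite | github.com/EliteaAI/elitea.github.io | scripts/fix-mdx-expressions.py | should_escape_curly
-- ===== SOURCE A (Python) =====
-- def should_escape_curly(line):
--     """Return True if this line has bare { or } that would trip MDX's acorn parser."""
--     stripped = line.strip()
--     # Skip lines that are pure MDX component tags
--     if stripped.startswith('<') and not stripped.startswith('<!'):
--         return False
--     # Skip frontmatter lines
--     if stripped.startswith('---'):
--         return False
--     # Check for bare (un-escaped) curly braces outside inline code
--     in_code = False
--     for ch in stripped:
--         if ch == chr(96):
--             in_code = not in_code
--         elif ch == '{' and not in_code: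
--             return True
--     return False
-- ===== SOURCE B (Python) =====
-- def should_escape_curly(line):
--     """Return True if this line has bare { or } that would trip MDX's acorn parser."""
--     stripped = line.strip()
--     # Skip lines that are pure MDX component tags
--     if stripped.startswith('<') and not stripped.startswith('<!'):
--         return False
--     # Skip frontmatter lines
--     if stripped.startswith('---'):
--         return False
--     # Even-indexed backtick-split segments are the text outside inline code
--     return any(i % 2 == 0 and '{' in seg
--                for i, seg in enumerate(stripped.split('`')))
-- ===== Notes on version B (the rewrite author's own statement) =====
-- stated objective: simpler
-- what changed: Replaces the per-character in_code toggle scan (with early return) by splitting the stripped line on backticks and checking whether any even-indexed segment contains a left curly brace.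
import Mathlib
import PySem

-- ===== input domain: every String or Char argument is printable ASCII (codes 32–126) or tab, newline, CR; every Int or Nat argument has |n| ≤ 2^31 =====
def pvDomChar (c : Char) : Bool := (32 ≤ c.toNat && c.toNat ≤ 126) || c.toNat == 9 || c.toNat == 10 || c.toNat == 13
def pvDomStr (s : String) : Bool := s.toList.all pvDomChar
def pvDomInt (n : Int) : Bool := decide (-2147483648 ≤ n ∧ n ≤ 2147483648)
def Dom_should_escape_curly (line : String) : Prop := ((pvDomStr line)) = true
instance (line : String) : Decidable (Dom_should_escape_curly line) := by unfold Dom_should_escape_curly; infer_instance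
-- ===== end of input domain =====

-- B replaces A's per-character in_code toggle scan by a split-on-backticks pass
-- that checks the even-indexed (outside-inline-code) segments for '{' (objective: simpler).

-- ===== PORT A =====
-- A's for-loop over the stripped characters with the in_code toggle and early return.
def pvLoopA : List Char → Bool → Bool
  | [], _ => false
  | c :: cs, inCode =>
      if c = '`' then pvLoopA cs (!inCode)
      else if c = '{' ∧ inCode = false then true
      else pvLoopA cs inCode

def should_escape_curly (line : String) : Bool :=
  let stripped := PySem.Str.strip line
  if PySem.Str.startswith stripped "<" && !PySem.Str.startswith stripped "<!" then false
  else if PySem.Str.startswith stripped "---" then false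
  else pvLoopA stripped.toList false

-- ===== PORT B =====
def should_escape_curly_alt (line : String) : Bool :=
  let stripped := PySem.Str.strip line
  if PySem.Str.startswith stripped "<" && !PySem.Str.startswith stripped "<!" then false
  else if PySem.Str.startswith stripped "---" then false
  else
    (PySem.List.enumerate (PySem.Chars.splitOn stripped.toList ['`'])).any
      (fun p => PySem.Int.mod p.1 2 == 0 && PySem.Chars.isIn ['{'] p.2)

-- ===== PRECONDITION & SPEC =====
def Spec_should_escape_curly (line : String) (out : Bool) : Prop := out = should_escape_curly_alt line
instance (line : String) (out : Bool) : Decidable (Spec_should_escape_curly line out) := by unfold Spec_should_escape_curly; infer_instance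

-- ===== CLAIM (what is proved, stated in full; the proofs are below) =====
def Claim_equal_should_escape_curly : Prop := ∀ (line : String), Dom_should_escape_curly line → Spec_should_escape_curly line (should_escape_curly line)

-- ===== LEMMAS AND PROOFS =====

-- A simple structural split on '`' used only in the proofs.
def pvSplit : List Char → List (List Char)
  | [] => [[]]
  | c :: cs =>
      if c = '`' then [] :: pvSplit cs
      else (pvSplit cs).modifyHead (c :: ·)

lemma pvSplit_ne_nil (cs : List Char) : pvSplit cs ≠ [] := by
  induction cs with
  | nil => simp [pvSplit]
  | cons c cs ih =>
      simp only [pvSplit]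
      split_ifs
      · simp
      · cases h : pvSplit cs with
        | nil => exact absurd h ih
        | cons s ss => simp [List.modifyHead]

lemma go_spec (l : List Char) : ∀ (fuel : Nat) (cur : List Char) (acc : List (List Char)),
    l.length < fuel →
    PySem.Chars.splitOn.go ['`'] fuel l cur acc
      = acc.reverse ++ (pvSplit l).modifyHead (cur.reverse ++ ·) := by
  induction l with
  | nil =>
      intro fuel cur acc hf
      obtain ⟨f, rfl⟩ : ∃ f, fuel = f + 1 := ⟨fuel - 1, by omega⟩
      simp [PySem.Chars.splitOn.go, pvSplit, List.modifyHead]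
  | cons c rest ih =>
      intro fuel cur acc hf
      obtain ⟨f, rfl⟩ : ∃ f, fuel = f + 1 := ⟨fuel - 1, by omega⟩
      rw [PySem.Chars.splitOn.go]
      simp only [List.isPrefixOf, List.length_cons] at *
      by_cases h : c = '`'
      · subst h
        rw [if_pos (by simp)]
        simp only [List.length_nil, Nat.zero_add, List.drop_succ_cons, List.drop_zero]
        rw [ih f [] (cur.reverse :: acc) (by omega)]
        cases hs : pvSplit rest with
        | nil => exact absurd hs (pvSplit_ne_nil rest)
        | cons s ss => simp [pvSplit, List.modifyHead, hs]
      · rw [if_neg (by simp; exact fun hh => h hh.symm)]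
        rw [ih f (c :: cur) acc (by omega)]
        simp only [pvSplit, if_neg h]
        cases hs : pvSplit rest with
        | nil => exact absurd hs (pvSplit_ne_nil rest)
        | cons s ss => simp [List.modifyHead]

lemma splitOn_eq_pvSplit (cs : List Char) :
    PySem.Chars.splitOn cs ['`'] = pvSplit cs := by
  rw [PySem.Chars.splitOn, go_spec cs (cs.length + 1) [] [] (by omega)]
  cases hs : pvSplit cs with
  | nil => exact absurd hs (pvSplit_ne_nil cs)
  | cons s ss => simp [List.modifyHead]

-- parity-alternating checker used to relate both sides
def pvChk : Bool → List (List Char) → Bool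
  | _, [] => false
  | false, s :: ss => s.contains '{' || pvChk true ss
  | true, _ :: ss => pvChk false ss

lemma loopA_eq_chk (cs : List Char) : ∀ b, pvLoopA cs b = pvChk b (pvSplit cs) := by
  induction cs with
  | nil => intro b; cases b <;> simp [pvLoopA, pvSplit, pvChk]
  | cons c cs ih =>
      intro b
      by_cases h : c = '`'
      · subst h
        rw [show pvLoopA ('`' :: cs) b = pvLoopA cs (!b) from by simp [pvLoopA]]
        cases b <;> simp [pvSplit, pvChk, ih]
      · cases hs : pvSplit cs with
        | nil => exact absurd hs (pvSplit_ne_nil cs)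
        | cons s ss =>
          cases b with
          | true =>
              rw [show pvLoopA (c :: cs) true = pvLoopA cs true from by
                simp [pvLoopA, h]]
              simp [pvSplit, h, hs, List.modifyHead, pvChk, ih]
          | false =>
              by_cases hb : c = '{'
              · subst hb
                simp [pvLoopA, h, pvSplit, hs, List.modifyHead, pvChk]
              · rw [show pvLoopA (c :: cs) false = pvLoopA cs false from by
                  simp [pvLoopA, h, hb]]
                simp [pvSplit, h, hs, List.modifyHead, pvChk, ih, show ¬('{' = c) from fun hh => hb hh.symm]

lemma isIn_singleton (s : List Char) : PySem.Chars.isIn ['{'] s = s.contains '{' := by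
  rw [Bool.eq_iff_iff, PySem.Chars.isIn_iff_infix, List.contains_iff_mem]
  exact List.singleton_infix_iff '{' s

lemma enum_any_eq_chk (ss : List (List Char)) : ∀ k : Int, 0 ≤ k →
    ((PySem.List.enumerate ss k).any
        (fun p => PySem.Int.mod p.1 2 == 0 && PySem.Chars.isIn ['{'] p.2))
      = pvChk (decide (k % 2 = 1)) ss := by
  induction ss with
  | nil => intro k hk; simp [PySem.List.enumerate, pvChk]
  | cons s ss ih =>
      intro k hk
      rw [show PySem.List.enumerate (s :: ss) k = (k, s) :: PySem.List.enumerate ss (k + 1)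
        from rfl]
      rw [List.any_cons, ih (k + 1) (by omega)]
      simp only [PySem.Int.mod_eq_emod_of_pos (by norm_num : (0:Int) < 2)]
      rcases Int.emod_two_eq_zero_or_one k with h | h
      · have h1 : (k + 1) % 2 = 1 := by omega
        simp [h, h1, pvChk, isIn_singleton]
      · have h1 : (k + 1) % 2 = 0 := by omega
        simp [h, h1, pvChk]

-- ===== VERDICT (by name: the statement is the Claim_ definition above) =====
theorem should_escape_curly_spec : Claim_equal_should_escape_curly := by
  intro line _
  unfold Spec_should_escape_curly should_escape_curly should_escape_curly_alt
  simp only []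
  split
  · rfl
  · split
    · rfl
    · rw [splitOn_eq_pvSplit, enum_any_eq_chk _ 0 (by norm_num), loopA_eq_chk]
      norm_num
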